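-- pv_equiv track=rewrite | github.com/sanskar37/AI-Powered-Code-Review-Assistant | ai-code-review-assistant/app/utils.py | format_issue_count
-- ===== SOURCE A (Python) =====
-- def format_issue_count(issues: list) -> str:
--     """
--     Create a human-readable summary of issue counts by severity.
--
--     Args:
--         issues: List of issue dictionaries with 'severity' key
--
--     Returns:
--         A formatted string like "2 Critical, 3 High, 1 Medium"
--
--     Example:
--         issues = [
--             {"severity": "High", "message": "..."},
--             {"severity": "High", "message": "..."},
--             {"severity": "Low", "message": "..."}
--         ]
--         format_issue_count(issues)  # Returns "2 High, 1 Low"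
--     """
--     if not issues:
--         return "No issues found"
--
--     # Count issues by severity
--     counts = {}
--     for issue in issues:
--         severity = issue.get("severity", "Unknown")
--         counts[severity] = counts.get(severity, 0) + 1
--
--     # Format the counts
--     # Order by severity (Critical first, then High, Medium, Low)
--     severity_order = ["Critical", "High", "Medium", "Low"]
--     parts = []
--
--     for severity in severity_order:
--         if severity in counts:
--             parts.append(f"{counts[severity]} {severity}")
--
--     # Add any unknown severities at the end
--     for severity, count in counts.items():
--         if severity not in severity_order:
--             parts.append(f"{count} {severity}")
--
--     return ", ".join(parts)
-- ===== SOURCE B (Python) =====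
-- def format_issue_count(issues: list) -> str:
--     if not issues:
--         return "No issues found"
--
--     counts = {}
--     for issue in issues:
--         severity = issue.get("severity", "Unknown")
--         counts[severity] = counts.get(severity, 0) + 1
--
--     order = ["Critical", "High", "Medium", "Low"]
--     # one pass turns every entry into (rank, part); then group by rank 0..4,
--     # rank 4 collecting the unknown severities in insertion order
--     pairs = [(order.index(s) if s in order else len(order), f"{c} {s}")
--              for s, c in counts.items()]
--     parts = [p for i in range(len(order) + 1) for r, p in pairs if r == i]
--     return ", ".join(parts)
-- ===== Notes on version B (the rewrite author's own statement) =====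
-- stated objective: alternative
-- what changed: A's two formatting loops (a scan over the fixed severity_order list with dict-membership tests, then a second scan over counts.items() for unknown severities) are replaced by one pass that tags every counted severity with a rank (index in the order list, or 4 for unknowns) and a single grouping of the tagged parts by rank 0..4, which reproduces A's order including insertion order among unknowns.
import Mathlib
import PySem

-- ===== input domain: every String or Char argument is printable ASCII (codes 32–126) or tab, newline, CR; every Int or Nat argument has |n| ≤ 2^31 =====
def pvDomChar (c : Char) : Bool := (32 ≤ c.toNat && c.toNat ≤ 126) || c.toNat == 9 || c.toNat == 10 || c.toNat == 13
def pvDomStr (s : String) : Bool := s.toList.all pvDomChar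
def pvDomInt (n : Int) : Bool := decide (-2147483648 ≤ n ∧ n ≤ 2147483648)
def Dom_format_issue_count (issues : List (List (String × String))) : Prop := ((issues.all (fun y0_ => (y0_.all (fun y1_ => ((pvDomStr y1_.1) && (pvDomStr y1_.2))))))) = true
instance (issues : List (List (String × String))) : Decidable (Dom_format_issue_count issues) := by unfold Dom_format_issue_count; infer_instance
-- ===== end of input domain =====

-- B replaces A's two formatting loops (fixed-order membership scan, then a second scan for the
-- unknown severities) by one pass that attaches a rank to every counted severity and a grouping
-- of the ranked parts by rank 0..4 (objective: alternative decomposition, same cost).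

-- shared constants: both Pythons contain the same severity list and the same f-string
def pvSeverityOrder : List String := ["Critical", "High", "Medium", "Low"]

def pvFmt (c : Int) (s : String) : String := PySem.Int.toStr c ++ " " ++ s  -- f"{count} {severity}"

-- ===== PORT A =====
def format_issue_count (issues : List (List (String × String))) : String :=
  if issues.isEmpty then "No issues found"
  else
    let counts : PySem.Dict String Int := issues.foldl (fun counts issue =>
      let severity := (PySem.Dict.mk issue).getD "severity" "Unknown"
      counts.insert severity (counts.getD severity 0 + 1)) PySem.Dict.empty
    let parts : List String := pvSeverityOrder.foldl (fun parts severity =>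
      if counts.contains severity then
        -- counts[severity]: the key is present (guarded by the contains test), so getD 0 is exact
        parts ++ [pvFmt (counts.getD severity 0) severity]
      else parts) []
    let parts := counts.items.foldl (fun parts p =>
      if !(pvSeverityOrder.contains p.1) then parts ++ [pvFmt p.2 p.1] else parts) parts
    PySem.Str.join ", " parts

-- ===== PORT B =====
-- rank(s) = order.index(s) if s in order else len(order); index? is guarded by contains, so getD 0 is exact
def pvRank (s : String) : Int :=
  if pvSeverityOrder.contains s then (((PySem.List.index? pvSeverityOrder s).getD 0 : Nat) : Int)
  else (pvSeverityOrder.length : Int)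

def format_issue_count_alt (issues : List (List (String × String))) : String :=
  if issues.isEmpty then "No issues found"
  else
    let counts : PySem.Dict String Int := issues.foldl (fun counts issue =>
      let severity := (PySem.Dict.mk issue).getD "severity" "Unknown"
      counts.insert severity (counts.getD severity 0 + 1)) PySem.Dict.empty
    let pairs := counts.items.map (fun p => (pvRank p.1, pvFmt p.2 p.1))
    let parts := (PySem.List.pyRange 0 ((pvSeverityOrder.length : Int) + 1) 1).flatMap
      (fun i => (pairs.filter (fun rp => rp.1 == i)).map (fun rp => rp.2))
    PySem.Str.join ", " parts

-- ===== PRECONDITION & SPEC =====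
def Spec_format_issue_count (issues : List (List (String × String))) (out : String) : Prop := out = format_issue_count_alt issues
instance (issues : List (List (String × String))) (out : String) : Decidable (Spec_format_issue_count issues out) := by unfold Spec_format_issue_count; infer_instance

-- ===== CLAIM (what is proved, stated in full; the proofs are below) =====
def Claim_equal_format_issue_count : Prop := ∀ (issues : List (List (String × String))), Dom_format_issue_count issues → Spec_format_issue_count issues (format_issue_count issues)

-- ===== LEMMAS AND PROOFS =====

lemma pvRank_def (k : String) : pvRank k =
    if k = "Critical" then 0 else if k = "High" then 1 else if k = "Medium" then 2
    else if k = "Low" then 3 else 4 := by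
  by_cases h1 : k = "Critical" <;> by_cases h2 : k = "High" <;> by_cases h3 : k = "Medium" <;>
    by_cases h4 : k = "Low" <;>
    simp [pvRank, pvSeverityOrder, PySem.List.index?, List.idxOf?, h1, h2, h3, h4] <;> decide

lemma pv_main (issues : List (List (String × String))) :
    format_issue_count issues = format_issue_count_alt issues := by
  unfold format_issue_count format_issue_count_alt
  by_cases he : issues.isEmpty
  · simp [he]
  · simp only [he, Bool.false_eq_true, if_false]
    set sevs := issues.map (fun issue => (PySem.Dict.mk issue).getD "severity" "Unknown") with hsevs
    have hcounts : issues.foldl (fun counts issue =>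
        let severity := (PySem.Dict.mk issue).getD "severity" "Unknown"
        counts.insert severity (counts.getD severity 0 + 1)) PySem.Dict.empty
        = PySem.Dict.counter sevs := by
      rw [← PySem.Dict.foldl_insert_getD_add_one_eq_counter, hsevs, List.foldl_map]
    rw [hcounts]
    rw [PySem.List.foldl_append_if (p := fun s => (PySem.Dict.counter sevs).contains s)
        (f := fun s => pvFmt ((PySem.Dict.counter sevs).getD s 0) s)]
    rw [PySem.List.foldl_append_if (p := fun p : String × Int => !(pvSeverityOrder.contains p.1))
        (f := fun p : String × Int => pvFmt p.2 p.1)]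
    rw [PySem.Dict.items_counter]
    congr 1
    have hrange : PySem.List.pyRange 0 ((pvSeverityOrder.length : Int) + 1) 1 = [0, 1, 2, 3, 4] := by decide
    rw [hrange]
    simp only [List.filter_map, List.map_map, Function.comp_def, List.nil_append,
      List.flatMap_cons, List.flatMap_nil, List.append_nil,
      PySem.Dict.getD_counter, PySem.Dict.contains_counter]
    have hnd : (PySem.Set.ofList sevs).Nodup := PySem.Set.nodup_ofList sevs
    have hmem : ∀ c : String, c ∈ PySem.Set.ofList sevs ↔ c ∈ sevs := fun c => PySem.Set.mem_ofList sevs c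
    have hsingle : ∀ c : String, (PySem.Set.ofList sevs).filter (fun k => k == c)
        = if c ∈ sevs then [c] else [] := by
      intro c
      rw [List.filter_beq]
      by_cases h : c ∈ sevs
      · rw [List.count_eq_one_of_mem hnd ((hmem c).mpr h)]; simp [h]
      · rw [List.count_eq_zero.mpr (fun hc => h ((hmem c).mp hc))]; simp [h]
    have hchunk : ∀ (c : String) (i : Int), (∀ k : String, (pvRank k == i) = (k == c)) →
        (PySem.Set.ofList sevs).filter (fun k => pvRank k == i) = if c ∈ sevs then [c] else [] := by
      intro c i h
      rw [List.filter_congr (fun k _ => h k), hsingle c]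
    have h0 := hchunk "Critical" 0 (fun k => by rw [pvRank_def]; split_ifs <;> simp_all)
    have h1 := hchunk "High" 1 (fun k => by rw [pvRank_def]; split_ifs <;> simp_all)
    have h2 := hchunk "Medium" 2 (fun k => by rw [pvRank_def]; split_ifs <;> simp_all)
    have h3 := hchunk "Low" 3 (fun k => by rw [pvRank_def]; split_ifs <;> simp_all)
    have h4 : (PySem.Set.ofList sevs).filter (fun k => pvRank k == (4:Int))
        = (PySem.Set.ofList sevs).filter (fun k => !pvSeverityOrder.contains k) := by
      refine List.filter_congr (fun k _ => ?_)
      rw [pvRank_def]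
      split_ifs <;> simp_all [pvSeverityOrder]
    rw [h0, h1, h2, h3, h4]
    simp only [pvSeverityOrder, List.filter_cons, List.filter_nil, List.contains_eq_mem]
    by_cases hC : "Critical" ∈ sevs <;> by_cases hH : "High" ∈ sevs <;>
      by_cases hM : "Medium" ∈ sevs <;> by_cases hL : "Low" ∈ sevs <;>
      simp [hC, hH, hM, hL]

-- ===== VERDICT (by name: the statement is the Claim_ definition above) =====
theorem format_issue_count_spec : Claim_equal_format_issue_count := by
  intro issues _
  unfold Spec_format_issue_count
  exact pv_main issues
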